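-- pv_equiv track=rewrite | github.com/khanhnguyendata/guttag | 6.00.1x/w3-3.py | return_longest_substrings
-- ===== SOURCE A (Python) =====
-- def return_longest_substrings(string):
--     substring = ""
--     substring_list = []
--
--     for index in range(len(string) - 1):  # Stop loop at second to last character to avoid index error
--         char_current = string[index]
--         char_next = string[index + 1]
--         # If the next character is alphabetically greater or equal to current character:
--         # Add both current character and next character if the longest substring is currently empty
--         # Otherwise, if there's already a current substrate, just add next character to substring
--         if char_current <= char_next:
--             if substring == "":
--                 substring += char_current
--                 substring += char_next
--             else:
--                 substring += char_next
--         # When the next character is alphabetically smaller than current character: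
--         # Reset substring if it's already built up
--         # Otherwise, if substring is empty (start of string or a break was found earlier), add the current
--         # character to the substring list (to account for cases like "cba" -> ['c', 'b', 'a']
--         else:
--             if substring:
--                 substring_list.append(substring)
--                 substring = ""
--             else:
--                 substring_list.append(char_current)
--
--     # If there's still a substring when loop ends (at second to last character),
--     # save this substring to the list as it wasn't saved during the looping
--     # due to lack of exit condition (an alphabetically smaller next character)
--     if substring:
--         substring_list.append(substring)
--     # If substring is empty when loop ends (at second to last character),
--     # for example, string of one character, break character at end of string,
--     # save the last lone character to substring list
--     else:
--         substring_list.append(string[-1])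
--
--     return substring_list
-- ===== SOURCE B (Python) =====
-- def return_longest_substrings(string):
--     n = len(string)
--     cuts = [i + 1 for i in range(n - 1) if string[i] > string[i + 1]]
--     bounds = [0] + cuts + [n]
--     return [string[a:b] for a, b in zip(bounds, bounds[1:])]
-- ===== Notes on version B (the rewrite author's own statement) =====
-- stated objective: alternative
-- what changed: B is a staged-passes algorithm: it first computes the list of cut indices (positions where a character strictly exceeds its successor), builds a bounds list, and then materialises the answer by slicing the string between consecutive bounds, instead of A's single pass that grows/flushes a substring accumulator with an empty-flag; Pre_ excludes the empty string, where A raises IndexError at string[-1].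
import Mathlib
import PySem

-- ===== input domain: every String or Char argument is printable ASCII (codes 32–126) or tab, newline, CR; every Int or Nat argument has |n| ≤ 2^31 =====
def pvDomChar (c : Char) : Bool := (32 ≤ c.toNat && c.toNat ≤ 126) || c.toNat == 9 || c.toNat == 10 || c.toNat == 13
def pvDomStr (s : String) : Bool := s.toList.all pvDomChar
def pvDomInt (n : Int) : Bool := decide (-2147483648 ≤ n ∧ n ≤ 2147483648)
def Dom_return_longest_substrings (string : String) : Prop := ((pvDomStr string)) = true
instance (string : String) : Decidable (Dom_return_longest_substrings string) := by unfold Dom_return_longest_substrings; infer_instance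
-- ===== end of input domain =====

-- B replaces A's accumulate-and-flush scan by a staged algorithm: compute cut indices,
-- build a bounds list, slice between consecutive bounds (objective: alternative).

-- ===== PORT A =====
-- loop body of A: at index idx, compare string[idx] with string[idx+1]; both indices are
-- in range for every idx produced by range(len(string)-1), so pyGetD is exact there
def stepA (cs : List Char) (st : List Char × List String) (idx : Int) : List Char × List String :=
  let char_current := PySem.List.pyGetD cs idx ' '
  let char_next := PySem.List.pyGetD cs (idx + 1) ' '
  if char_current ≤ char_next then
    if st.1 = [] then (st.1 ++ [char_current] ++ [char_next], st.2)
    else (st.1 ++ [char_next], st.2)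
  else
    if st.1 ≠ [] then ([], st.2 ++ [String.ofList st.1])
    else (st.1, st.2 ++ [String.ofList [char_current]])

def return_longest_substrings (string : String) : List String :=
  let cs := string.toList
  let st := (PySem.List.pyRange 0 ((cs.length : Int) - 1)).foldl (stepA cs) ([], [])
  if st.1 ≠ [] then st.2 ++ [String.ofList st.1]
  else st.2 ++ [String.ofList [PySem.List.pyGetD cs (-1) ' ']]  -- string[-1]; Pre_ gives cs ≠ []

-- ===== PORT B =====
-- cuts = [i + 1 for i in range(n - 1) if string[i] > string[i + 1]];
-- bounds = [0] + cuts + [n]; return [string[a:b] for a, b in zip(bounds, bounds[1:])]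
def return_longest_substrings_alt (string : String) : List String :=
  let cs := string.toList
  let n : Int := cs.length
  let cuts := ((PySem.List.pyRange 0 (n - 1)).filter
      (fun i => PySem.List.pyGetD cs (i + 1) ' ' < PySem.List.pyGetD cs i ' ')).map (· + 1)
  let bounds := 0 :: cuts ++ [n]
  (bounds.zip bounds.tail).map (fun ab => String.ofList (PySem.List.slice cs (some ab.1) (some ab.2)))

-- ===== PRECONDITION & SPEC =====
-- Pre_ excludes only the empty string, on which A raises IndexError at string[-1]
def Pre_return_longest_substrings (string : String) : Prop := string ≠ ""
instance (string : String) : Decidable (Pre_return_longest_substrings string) := by unfold Pre_return_longest_substrings; infer_instance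
def pvWitness_return_longest_substrings : String := "abcba"

def Spec_return_longest_substrings (string : String) (out : List String) : Prop := out = return_longest_substrings_alt string
instance (string : String) (out : List String) : Decidable (Spec_return_longest_substrings string out) := by unfold Spec_return_longest_substrings; infer_instance

-- ===== CLAIM (what is proved, stated in full; the proofs are below) =====
def Claim_equal_return_longest_substrings : Prop := ∀ (string : String), Dom_return_longest_substrings string → Pre_return_longest_substrings string → Spec_return_longest_substrings string (return_longest_substrings string)

-- ===== LEMMAS AND PROOFS =====

-- common spine used only by the proofs: the list of maximal non-decreasing runs,
-- returned as (first run, remaining runs)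
def runsP : Char → List Char → List Char × List (List Char)
  | c, [] => ([c], [])
  | c, ch :: t =>
    if c ≤ ch then (c :: (runsP ch t).1, (runsP ch t).2)
    else ([c], (runsP ch t).1 :: (runsP ch t).2)

-- structural version of A's indexed loop
def loopA : List Char → Char → List Char → List String → List Char × List String
  | [], _, sub, acc => (sub, acc)
  | n :: rest, c, sub, acc =>
    if c ≤ n then
      if sub = [] then loopA rest n (sub ++ [c] ++ [n]) acc
      else loopA rest n (sub ++ [n]) acc
    else
      if sub ≠ [] then loopA rest n [] (acc ++ [String.ofList sub])
      else loopA rest n sub (acc ++ [String.ofList [c]])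

-- Nat-indexed versions of B's two stages
def cutsN (cs : List Char) : List Nat :=
  ((List.range (cs.length - 1)).filter (fun i => cs.getD (i + 1) ' ' < cs.getD i ' ')).map (· + 1)

def slicesAt (cs : List Char) : List Nat → List (List Char)
  | a :: b :: t => ((cs.drop a).take (b - a)) :: slicesAt cs (b :: t)
  | _ => []

-- A's indexed foldl over range(len-1) equals loopA on the character list
theorem bridgeA : ∀ (rest pre : List Char) (c : Char) (sub : List Char) (acc : List String),
    (List.range' pre.length rest.length).foldl
      (fun st (j : Nat) => stepA (pre ++ c :: rest) st (j : Int)) (sub, acc)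
      = loopA rest c sub acc := by
  intro rest
  induction rest with
  | nil => intro pre c sub acc; simp [loopA]
  | cons n rest' ih =>
    intro pre c sub acc
    have hcur : PySem.List.pyGetD (pre ++ c :: n :: rest') (pre.length : Int) ' ' = c := by
      rw [PySem.List.pyGetD_natCast]
      simp [List.getD, List.getElem?_append_right]
    have hnext : PySem.List.pyGetD (pre ++ c :: n :: rest') ((pre.length : Int) + 1) ' ' = n := by
      have h : ((pre.length : Int) + 1) = ((pre.length + 1 : Nat) : Int) := by push_cast; ring
      rw [h, PySem.List.pyGetD_natCast]
      simp [List.getD, List.getElem?_append_right]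
    simp only [List.length_cons, List.range'_succ, List.foldl_cons]
    by_cases h1 : c ≤ n <;> by_cases h2 : sub = [] <;>
      simp only [stepA, hcur, hnext, h1, h2, if_true, if_false, ite_true, ite_false, ne_eq,
        not_true_eq_false, not_false_eq_true, loopA] <;>
      rw [show pre ++ c :: n :: rest' = (pre ++ [c]) ++ n :: rest' by simp,
          show pre.length + 1 = (pre ++ [c]).length by simp] <;>
      exact ih (pre ++ [c]) n _ _

-- A's loop state (substring, list) + final flush computes the runs of the string;
-- A's substring is empty exactly when the current run is a single character
theorem loopA_runs : ∀ (rest cur : List Char) (acc : List String) (c : Char),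
    cur.getLast? = some c →
    (let st := loopA rest c (if cur.length = 1 then [] else cur) acc
     if st.1 ≠ [] then st.2 ++ [String.ofList st.1]
     else st.2 ++ [String.ofList [(c :: rest).getLastD ' ']])
    = acc ++ String.ofList (cur.dropLast ++ (runsP c rest).1) :: (runsP c rest).2.map String.ofList := by
  intro rest
  induction rest with
  | nil =>
    intro cur acc c hlast
    have hcur : cur.dropLast ++ [c] = cur := by
      have hne : cur ≠ [] := by rintro rfl; simp at hlast
      rw [List.getLast?_eq_some_getLast hne] at hlast
      rw [← Option.some.inj hlast]; exact List.dropLast_append_getLast hne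
    by_cases h1 : cur.length = 1
    · have : cur = [c] := by
        obtain ⟨x, rfl⟩ := List.length_eq_one_iff.mp h1
        simp at hlast; simp [hlast]
      simp [loopA, runsP, h1, this]
    · have hne : cur ≠ [] := by rintro rfl; simp at hlast
      simp [loopA, runsP, h1, hne, hcur]
  | cons ch rest' ih =>
    intro cur acc c hlast
    have hne : cur ≠ [] := by rintro rfl; simp at hlast
    have hcur : cur.dropLast ++ [c] = cur := by
      rw [List.getLast?_eq_some_getLast hne] at hlast
      rw [← Option.some.inj hlast]; exact List.dropLast_append_getLast hne
    have hone : cur.length = 1 → cur = [c] := by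
      intro h1
      obtain ⟨x, rfl⟩ := List.length_eq_one_iff.mp h1
      simp at hlast; simp [hlast]
    by_cases hcmp : c ≤ ch
    · -- the run extends
      have hIH := ih (cur ++ [ch]) acc ch (by simp)
      have hlen : ¬ (cur ++ [ch]).length = 1 := by
        have := List.length_pos_of_ne_nil hne; simp; omega
      rw [if_neg hlen] at hIH
      have hlast2 : (ch :: rest').getLastD ' ' = (c :: ch :: rest').getLastD ' ' := by
        simp [List.getLastD_cons]
      by_cases h1 : cur.length = 1
      · simp only [loopA, if_pos hcmp, if_pos h1, ite_true, if_pos rfl]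
        rw [show ([] : List Char) ++ [c] ++ [ch] = cur ++ [ch] by simp [hone h1]]
        rw [hlast2] at hIH
        rw [hIH]
        simp [runsP, hcmp, hone h1]
      · simp only [loopA, if_pos hcmp, if_neg h1, ite_false, if_neg hne]
        rw [hlast2] at hIH
        rw [hIH]
        have : (cur ++ [ch]).dropLast ++ (runsP ch rest').1
            = cur.dropLast ++ (runsP c (ch :: rest')).1 := by
          rw [List.dropLast_concat]
          simp only [runsP, if_pos hcmp]
          rw [List.append_cons, hcur]
        rw [this]
        simp [runsP, hcmp]
    · -- the run is flushed
      have hIH := ih [ch] (acc ++ [String.ofList cur]) ch (by simp)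
      rw [show (if ([ch] : List Char).length = 1 then ([] : List Char) else [ch]) = [] by simp] at hIH
      have hlast2 : (ch :: rest').getLastD ' ' = (c :: ch :: rest').getLastD ' ' := by
        simp [List.getLastD_cons]
      by_cases h1 : cur.length = 1
      · simp only [loopA, if_neg hcmp, if_pos h1, ite_true, ne_eq, not_true_eq_false, ite_false,
          if_neg (show ¬ (([] : List Char) ≠ []) by simp)]
        rw [show String.ofList [c] = String.ofList cur by rw [hone h1]]
        rw [hlast2] at hIH
        rw [hIH]
        simp [runsP, hcmp, hcur]
      · simp only [loopA, if_neg hcmp, if_neg h1, ite_false, ne_eq]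
        rw [if_pos (show ¬ cur = [] from hne)]
        rw [hlast2] at hIH
        rw [hIH]
        simp [runsP, hcmp, hcur]

-- shifting every bound by one drops the head character
theorem slicesAt_shift (xs : List Char) (c : Char) :
    ∀ bs : List Nat, slicesAt (c :: xs) (bs.map (· + 1)) = slicesAt xs bs := by
  intro bs
  induction bs with
  | nil => simp [slicesAt]
  | cons a t ih =>
    cases t with
    | nil => simp [slicesAt]
    | cons b t' =>
      simp only [List.map_cons] at ih ⊢
      simp only [slicesAt, List.drop_succ_cons]
      rw [show b + 1 - (a + 1) = b - a by omega]
      exact congrArg _ ih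

-- cut indices of c :: ch :: t: a cut at 1 iff ch < c, plus the shifted cuts of ch :: t
theorem cutsN_cons (c ch : Char) (t : List Char) :
    cutsN (c :: ch :: t) = (if ch < c then [1] else []) ++ (cutsN (ch :: t)).map (· + 1) := by
  unfold cutsN
  simp only [List.length_cons, Nat.add_sub_cancel]
  rw [List.range_succ_eq_map, List.filter_cons, List.filter_map]
  by_cases h : ch < c <;>
    · simp [h, List.map_map, Function.comp_def, Nat.succ_eq_add_one, List.getD_cons_succ,
        List.getD_cons_zero]
      rfl

-- the generic zip-of-consecutive-bounds comprehension is slicesAt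
theorem zip_slices (cs : List Char) : ∀ bs : List Nat,
    (bs.zip bs.tail).map (fun ab => (cs.drop ab.1).take (ab.2 - ab.1)) = slicesAt cs bs := by
  intro bs
  induction bs with
  | nil => simp [slicesAt]
  | cons a t ih =>
    cases t with
    | nil => simp [slicesAt]
    | cons b t' => simpa [slicesAt] using ih

-- B's two stages compute the runs
theorem slices_eq_runs : ∀ (rest : List Char) (c : Char),
    slicesAt (c :: rest) (0 :: cutsN (c :: rest) ++ [(c :: rest).length])
      = (runsP c rest).1 :: (runsP c rest).2 := by
  intro rest
  induction rest with
  | nil => intro c; simp [cutsN, slicesAt, runsP]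
  | cons ch t ih =>
    intro c
    rw [cutsN_cons, List.cons_append]
    cases hsplit : cutsN (ch :: t) ++ [(ch :: t).length] with
    | nil => exact absurd hsplit (by simp)
    | cons b1 t2 =>
      have hmap : (cutsN (ch :: t)).map (· + 1) ++ [(c :: ch :: t).length]
          = (b1 + 1) :: t2.map (· + 1) := by
        have := congrArg (List.map (· + 1)) hsplit
        simpa [List.length_cons] using this
      have hIH := ih ch
      rw [List.cons_append, hsplit] at hIH
      simp only [slicesAt, List.drop_zero, Nat.sub_zero, List.take_succ_cons] at hIH
      obtain ⟨hr, hrs⟩ := (List.cons.injEq _ _ _ _).mp hIH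
      by_cases h : ch < c
      · -- a cut right after c: the first run is [c]
        rw [if_pos h]
        simp only [List.cons_append, List.nil_append, List.append_assoc]
        rw [hmap]
        simp only [slicesAt, List.drop_zero, Nat.sub_zero, List.take_succ_cons, List.take_zero,
          List.drop_succ_cons]
        have hshift : slicesAt (c :: ch :: t) ((b1 + 1) :: t2.map (· + 1))
            = slicesAt (ch :: t) (b1 :: t2) := by
          have := slicesAt_shift (ch :: t) c (b1 :: t2)
          simpa using this
        rw [Nat.add_sub_cancel, hshift, hr, hrs]
        simp [runsP, if_neg (not_le.mpr h)]
      · -- no cut: c joins the first run of ch :: t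
        rw [if_neg h]
        simp only [List.nil_append]
        rw [hmap]
        simp only [slicesAt, List.drop_zero, Nat.sub_zero, List.take_succ_cons]
        have hshift : slicesAt (c :: ch :: t) ((b1 + 1) :: t2.map (· + 1))
            = slicesAt (ch :: t) (b1 :: t2) := by
          have := slicesAt_shift (ch :: t) c (b1 :: t2)
          simpa using this
        rw [hshift, hr, hrs]
        simp [runsP, if_pos (not_lt.mp h)]

-- B's port equals its Nat-indexed staged form
theorem bridgeB (s : String) (hs : s.toList ≠ []) :
    return_longest_substrings_alt s
      = (slicesAt s.toList (0 :: cutsN s.toList ++ [s.toList.length])).map String.ofList := by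
  simp only [return_longest_substrings_alt]
  have hlen : ((s.toList.length : Int) - 1) = ((s.toList.length - 1 : Nat) : Int) := by
    have := List.length_pos_of_ne_nil hs; omega
  rw [hlen, PySem.List.pyRange_zero_natCast, List.filter_map]
  have hcond : ((fun i : Int => decide (PySem.List.pyGetD s.toList (i + 1) ' ' < PySem.List.pyGetD s.toList i ' '))
        ∘ (fun k : Nat => (k : Int)))
      = (fun i : Nat => decide (s.toList.getD (i + 1) ' ' < s.toList.getD i ' ')) := by
    funext i
    have h1 : ((i : Int) + 1) = ((i + 1 : Nat) : Int) := by push_cast; ring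
    simp only [Function.comp_def]
    rw [h1]
    simp only [PySem.List.pyGetD_natCast]
  rw [hcond]
  have hcuts : (((List.range (s.toList.length - 1)).filter
          (fun i : Nat => decide (s.toList.getD (i + 1) ' ' < s.toList.getD i ' '))).map
            (fun k : Nat => (k : Int))).map (· + 1)
      = (cutsN s.toList).map (fun k : Nat => (k : Int)) := by
    unfold cutsN
    simp only [List.map_map]
    exact List.map_congr_left (fun x _ => by simp)
  rw [hcuts]
  have hbounds : (0 : Int) :: (cutsN s.toList).map (fun k : Nat => (k : Int)) ++ [(s.toList.length : Int)]
      = (0 :: cutsN s.toList ++ [s.toList.length]).map (fun k : Nat => (k : Int)) := by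
    simp
  rw [hbounds]
  rw [show ((0 :: cutsN s.toList ++ [s.toList.length]).map (fun k : Nat => (k : Int))).tail
      = (0 :: cutsN s.toList ++ [s.toList.length]).tail.map (fun k : Nat => (k : Int)) by
    cases h : cutsN s.toList <;> simp]
  rw [List.zip_map, List.map_map]
  rw [show ((fun ab : Int × Int => String.ofList (PySem.List.slice s.toList (some ab.1) (some ab.2)))
        ∘ Prod.map (fun k : Nat => (k : Int)) (fun k : Nat => (k : Int)))
      = (fun ab : Nat × Nat => String.ofList ((s.toList.drop ab.1).take (ab.2 - ab.1))) by
    funext ab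
    simp [Function.comp_def, Prod.map, PySem.List.slice_natCast]]
  rw [show (fun ab : Nat × Nat => String.ofList ((s.toList.drop ab.1).take (ab.2 - ab.1)))
      = String.ofList ∘ (fun ab : Nat × Nat => ((s.toList.drop ab.1).take (ab.2 - ab.1))) from rfl]
  rw [← List.map_map, zip_slices]

-- ===== VERDICT (by name: the statement is the Claim_ definition above) =====
theorem return_longest_substrings_spec : Claim_equal_return_longest_substrings := by
  intro s _ hpre
  unfold Spec_return_longest_substrings
  have hnil : s.toList ≠ [] := by
    intro h; exact hpre (String.toList_eq_nil_iff.mp h)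
  obtain ⟨c, rest, hcs⟩ : ∃ c rest, s.toList = c :: rest := by
    cases hh : s.toList with
    | nil => exact absurd hh hnil
    | cons a l => exact ⟨a, l, rfl⟩
  rw [bridgeB s hnil]
  -- A side
  simp only [return_longest_substrings, hcs]
  have hlen : (((c :: rest).length : Int) - 1) = ((rest.length : Nat) : Int) := by simp
  rw [hlen, PySem.List.pyRange_zero_natCast, List.foldl_map, List.range_eq_range']
  have hb := bridgeA rest [] c [] []
  simp only [List.length_nil, List.nil_append] at hb
  rw [hb]
  have hflush := loopA_runs rest [c] [] c (by simp)
  simp only [List.length_cons, List.length_nil, ite_true, List.nil_append] at hflush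
  have hneg : PySem.List.pyGetD (c :: rest) (-1) ' ' = (c :: rest).getLastD ' ' := by
    rw [PySem.List.pyGetD_neg_one (c :: rest) ' ' (by simp)]
    rw [List.getLastD_eq_getLast?, List.getLast?_eq_some_getLast (l := c :: rest) (by simp)]
    rfl
  rw [hneg]
  rw [hflush]
  -- B side
  rw [slices_eq_runs rest c]
  simp
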